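-- pv_equiv track=rewrite | github.com/Chitraketu/projecteuler | q59.py | isDecipherable
-- ===== SOURCE A (Python) =====
-- def isAlphabet(xx):
-- 	x = ord(xx)
-- 	symbols = ['.','?',',',';',':','-','(',')','[',']','{','}','\'','"','!','/', ' ','0','1','2','3','4','5','6','7','8','9']
-- 	ascii_symbols = list(map(ord,symbols))
-- 	return ord('A') <= x <= ord('Z') or ord('a') <= x <= ord('z') or xx in symbols
--
-- def encode(s,l):
-- 	encoded = []
-- 	for i in range(len(s)):
-- 		encoded.append(chr(ord(s[i]) ^ ord(l[i%len(l)])))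
-- 	return encoded
--
-- def isDecipherable(s,l):
-- 	enc = encode(s,l)
-- 	msg = ''
-- 	for x in enc:
-- 		if not isAlphabet(x):
-- 			return ''
-- 		else:
-- 			msg += x
-- 	return msg
-- ===== SOURCE B (Python) =====
-- _LEGAL = set(
--     'ABCDEFGHIJKLMNOPQRSTUVWXYZabcdefghijklmnopqrstuvwxyz'
--     '0123456789.?,;:-()[]{}\'"!/ '
-- )
--
-- def isDecipherable(s, l):
--     # Vigenere-style column decomposition: every character of the key sees its own
--     # column s[j::n], decoded with a single fixed key byte and vetted as a whole
--     # batch; the columns are then interleaved back, row by row, into the message.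
--     n = len(l)
--     cols = []
--     for j in range(n):
--         k = ord(l[j])
--         col = [chr(ord(ch) ^ k) for ch in s[j::n]]
--         if not _LEGAL.issuperset(col):
--             return ''
--         cols.append(col)
--     m = len(cols[0]) if cols else 0
--     out = []
--     for i in range(m):
--         for col in cols:
--             if i < len(col):
--                 out.append(col[i])
--     return ''.join(out)
-- ===== Notes on version B (the rewrite author's own statement) =====
-- stated objective: faster
-- what changed: Replaces A's index-cycling encode pass plus per-character validate pass (which rebuilds the 26-entry symbol list and its ord-map inside isAlphabet for every character) by a Vigenere-style column decomposition: for each key position j it decodes the whole stride s[j::len(l)] with that single key byte, vets the column in one batch against a precomputed set, and interleaves the columns row by row back into the message; no i % len(l) cycling and no per-character list rebuild.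
import Mathlib
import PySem

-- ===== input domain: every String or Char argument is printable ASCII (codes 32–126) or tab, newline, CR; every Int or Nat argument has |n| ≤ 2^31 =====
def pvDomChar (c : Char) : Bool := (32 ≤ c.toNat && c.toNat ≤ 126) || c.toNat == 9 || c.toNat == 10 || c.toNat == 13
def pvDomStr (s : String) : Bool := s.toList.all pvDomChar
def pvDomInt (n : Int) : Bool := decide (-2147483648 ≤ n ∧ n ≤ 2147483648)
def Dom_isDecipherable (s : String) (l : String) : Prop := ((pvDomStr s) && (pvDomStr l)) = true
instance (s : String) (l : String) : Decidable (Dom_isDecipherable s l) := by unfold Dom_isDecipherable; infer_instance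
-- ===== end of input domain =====

-- B replaces A's index-cycling encode+validate passes (per-character symbol-list
-- rebuild) by a column decomposition: decode each key position's stride as a batch
-- against a precomputed set, then interleave rows back (measured faster by a
-- constant factor); return values proved equal on Pre_ (key nonempty or message empty).


-- ===== PORT A =====
-- A's symbol list (rebuilt per call in isAlphabet)
def pvSymbols : List Char :=
  ['.','?',',',';',':','-','(',')','[',']','{','}','\'','"','!','/',' ','0','1','2','3','4','5','6','7','8','9']

def isAlphabetA (xx : Char) : Bool :=
  let x := xx.toNat
  (('A'.toNat ≤ x && x ≤ 'Z'.toNat) || ('a'.toNat ≤ x && x ≤ 'z'.toNat) || pvSymbols.contains xx)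

-- chr(ord(s[i]) ^ ord(l[i % len(l)])); the ' ' fallback is never reached inside Pre_
def pvXorChar (s : List Char) (l : List Char) (i : Nat) : Char :=
  Char.ofNat ((s[i]?.getD ' ').toNat ^^^ (l[i % l.length]?.getD ' ').toNat)

-- 'for i in range(len(s)): encoded.append(...)' as recursion on the index
def encLoop (s : List Char) (l : List Char) (i : Nat) : List Char :=
  if i < s.length then pvXorChar s l i :: encLoop s l (i + 1) else []
termination_by s.length - i

-- 'for x in enc: if not isAlphabet(x): return ""; msg += x'
def checkLoop (msg : String) : List Char → String
  | [] => msg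
  | x :: xs => if !isAlphabetA x then "" else checkLoop (msg.push x) xs

def isDecipherable (s : String) (l : String) : String :=
  checkLoop "" (encLoop s.toList l.toList 0)

-- ===== PORT B =====
-- B's precomputed legal-character set
def pvLegal : List Char :=
  ("ABCDEFGHIJKLMNOPQRSTUVWXYZabcdefghijklmnopqrstuvwxyz0123456789.?,;:-()[]{}'\"!/ ").toList

-- s[j::n] for n ≥ 1 (the n = 0 guard only makes the recursion total; B never calls it)
def strideFrom (s : List Char) (j : Nat) (n : Nat) : List Char :=
  if h : j < s.length ∧ n ≠ 0 then s[j]'h.1 :: strideFrom s (j + n) n else []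
termination_by s.length - j
decreasing_by omega

-- '[chr(ord(ch) ^ k) for ch in s[j::n]]' with k = ord(l[j])
def colFor (s : List Char) (l : List Char) (n : Nat) (j : Nat) : List Char :=
  (strideFrom s j n).map (fun ch => Char.ofNat (ch.toNat ^^^ (l[j]?.getD ' ').toNat))

-- 'm = len(cols[0]) if cols else 0' and the two row-interleaving loops
def interleave (cols : List (List Char)) : List Char :=
  let m := match cols with | [] => 0 | c :: _ => c.length
  (List.range m).flatMap (fun i => cols.filterMap (fun col => col[i]?))

-- 'for j in range(n): ... if not _LEGAL.issuperset(col): return ""; cols.append(col)'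
def bLoop (s : List Char) (l : List Char) (n : Nat) (j : Nat) (cols : List (List Char)) : String :=
  if j < n then
    let col := colFor s l n j
    if col.all (fun c => pvLegal.contains c) then bLoop s l n (j + 1) (cols ++ [col]) else ""
  else String.ofList (interleave cols)
termination_by n - j

def isDecipherable_alt (s : String) (l : String) : String :=
  bLoop s.toList l.toList l.toList.length 0 []

-- ===== PRECONDITION & SPEC =====
-- Python A raises ZeroDivisionError (i % len(l)) when l is empty and s is nonempty;
-- Pre_ excludes exactly those inputs.
def Pre_isDecipherable (s : String) (l : String) : Prop := l ≠ "" ∨ s = ""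
instance (s : String) (l : String) : Decidable (Pre_isDecipherable s l) := by
  unfold Pre_isDecipherable; infer_instance

def pvWitness_isDecipherable : String × String := ("Ld", "(")

def Spec_isDecipherable (s : String) (l : String) (out : String) : Prop := out = isDecipherable_alt s l
instance (s : String) (l : String) (out : String) : Decidable (Spec_isDecipherable s l out) := by unfold Spec_isDecipherable; infer_instance

-- ===== CLAIM (what is proved, stated in full; the proofs are below) =====
def Claim_equal_isDecipherable : Prop := ∀ (s : String) (l : String), Dom_isDecipherable s l → Pre_isDecipherable s l → Spec_isDecipherable s l (isDecipherable s l)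

-- ===== LEMMAS AND PROOFS =====

-- A's range/list test and B's set membership agree on all codes < 128
set_option maxRecDepth 4000 in
theorem alpha_eq_lt (n : Nat) (h : n < 128) :
    isAlphabetA (Char.ofNat n) = pvLegal.contains (Char.ofNat n) := by
  have hall : ∀ m ∈ List.range 128,
      isAlphabetA (Char.ofNat m) = pvLegal.contains (Char.ofNat m) := by decide
  exact hall n (List.mem_range.mpr h)

theorem alpha_eq (c : Char) (h : c.toNat < 128) :
    isAlphabetA c = pvLegal.contains c := by
  have := alpha_eq_lt c.toNat h
  simpa [Char.ofNat_toNat] using this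

theorem dom_char_lt {s : String} (hs : pvDomStr s = true) {c : Char}
    (hc : c ∈ s.toList) : c.toNat < 128 := by
  have := List.all_eq_true.mp hs c hc
  simp only [pvDomChar, Bool.or_eq_true, Bool.and_eq_true, decide_eq_true_eq,
    beq_iff_eq] at this
  omega

theorem push_mk (acc : List Char) (c : Char) :
    (String.ofList acc).push c = String.ofList (acc ++ [c]) := by
  apply String.toList_injective; simp

theorem toNat_ofNat_lt (n : Nat) (h : n < 128) : (Char.ofNat n).toNat = n := by
  rw [Char.toNat_ofNat, if_pos]; exact Or.inl (by omega)

-- decoded characters stay below 128 on Dom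
theorem xor_char_lt {s l : List Char} (hs : ∀ c ∈ s, c.toNat < 128)
    (hl : ∀ c ∈ l, c.toNat < 128) (i : Nat) : (pvXorChar s l i).toNat < 128 := by
  have h1 : (s[i]?.getD ' ').toNat < 128 := by
    cases hg : s[i]? with
    | none => simp
    | some k => simpa using hs k (List.mem_of_getElem? hg)
  have h2 : (l[i % l.length]?.getD ' ').toNat < 128 := by
    cases hg : l[i % l.length]? with
    | none => simp
    | some k => simpa using hl k (List.mem_of_getElem? hg)
  have hx : (s[i]?.getD ' ').toNat ^^^ (l[i % l.length]?.getD ' ').toNat < 128 := by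
    have := Nat.xor_lt_two_pow (n := 7) h1 h2
    simpa using this
  simpa [pvXorChar, toNat_ofNat_lt _ hx] using hx

-- (1) A's validate loop, characterised
theorem checkLoop_char (xs : List Char) : ∀ (msg : List Char),
    checkLoop (String.ofList msg) xs =
      if xs.all isAlphabetA then String.ofList (msg ++ xs) else "" := by
  induction xs with
  | nil => intro msg; simp [checkLoop]
  | cons x xs ih =>
    intro msg
    simp only [checkLoop, List.all_cons, Bool.and_eq_true]
    by_cases hx : isAlphabetA x = true
    · rw [if_neg (by simp [hx]), push_mk, ih (msg ++ [x])]
      by_cases hxs : xs.all isAlphabetA = true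
      · simp [hx, hxs]
      · simp [hx, hxs]
    · simp [hx]

-- (2) A's encode loop, characterised
theorem encLoop_eq (s l : List Char) : ∀ (k i : Nat), k = s.length - i →
    encLoop s l i = (List.range' i k).map (pvXorChar s l) := by
  intro k
  induction k with
  | zero =>
    intro i hk
    rw [encLoop, if_neg (by omega)]; simp
  | succ k ih =>
    intro i hk
    have hi : i < s.length := by omega
    rw [encLoop, if_pos hi, List.range'_succ, List.map_cons, ih (i + 1) (by omega)]

theorem encLoop_zero (s l : List Char) :
    encLoop s l 0 = (List.range s.length).map (pvXorChar s l) := by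
  rw [encLoop_eq s l s.length 0 (by omega), List.range_eq_range']

-- A's result = if all decoded legal then decoded string else ""
theorem isDecipherable_eq (s l : String) :
    isDecipherable s l =
      if ((List.range s.toList.length).map (pvXorChar s.toList l.toList)).all isAlphabetA
      then String.ofList ((List.range s.toList.length).map (pvXorChar s.toList l.toList))
      else "" := by
  have h0 : ("" : String) = String.ofList ([] : List Char) := rfl
  rw [isDecipherable, encLoop_zero, h0, checkLoop_char]
  simp

-- (3) stride indexing: (s[j::n])[r] = s[j + r*n]
theorem strideFrom_get (s : List Char) (n : Nat) (hn : n ≠ 0) :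
    ∀ (r j : Nat), (strideFrom s j n)[r]? = s[j + r * n]? := by
  intro r
  induction r with
  | zero =>
    intro j
    rw [strideFrom]
    by_cases h : j < s.length
    · rw [dif_pos ⟨h, hn⟩]; simp [List.getElem?_eq_getElem h]
    · rw [dif_neg (by tauto)]
      rw [List.getElem?_eq_none (by omega : s.length ≤ j + 0 * n)]
      simp
  | succ r ih =>
    intro j
    rw [strideFrom]
    by_cases h : j < s.length
    · rw [dif_pos ⟨h, hn⟩]
      simp only [List.getElem?_cons_succ, ih (j + n)]
      congr 1; ring
    · rw [dif_neg (by tauto)]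
      rw [List.getElem?_eq_none (by omega : s.length ≤ j + (r + 1) * n)]
      simp

-- (4) column indexing: (colFor j)[r] = decoded char at j + r*n (key index reduced mod n)
theorem colFor_get (s l : List Char) (j r : Nat) (hj : j < l.length) :
    (colFor s l l.length j)[r]? =
      if j + r * l.length < s.length then some (pvXorChar s l (j + r * l.length)) else none := by
  have hn : l.length ≠ 0 := by omega
  rw [colFor, List.getElem?_map, strideFrom_get s l.length hn r j]
  by_cases h : j + r * l.length < s.length
  · rw [if_pos h, List.getElem?_eq_getElem h]
    simp only [Option.map_some]
    congr 1
    have hmod : (j + r * l.length) % l.length = j := by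
      rw [Nat.add_mul_mod_self_right, Nat.mod_eq_of_lt hj]
    simp [pvXorChar, hmod, List.getElem?_eq_getElem h, List.getElem?_eq_getElem hj]
  · rw [if_neg h,
      show s[j + r * l.length]? = none from List.getElem?_eq_none (by omega)]
    simp

-- (5) the first column's length m satisfies: r < m ↔ r*n < len s
theorem col0_len (s l : List Char) (hl : 0 < l.length) (r : Nat) :
    r < (colFor s l l.length 0).length ↔ r * l.length < s.length := by
  have hg := colFor_get s l 0 r hl
  simp only [Nat.zero_add] at hg
  by_cases h : r * l.length < s.length
  · rw [if_pos h] at hg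
    obtain ⟨hlt, -⟩ := List.getElem?_eq_some_iff.mp hg
    exact iff_of_true hlt h
  · rw [if_neg h] at hg
    have := List.getElem?_eq_none_iff.mp hg
    exact iff_of_false (by omega) h

-- (6) per-column legality ⟺ legality of every decoded character
theorem col_all_iff (s l : List Char) (j : Nat) (hj : j < l.length) :
    ((colFor s l l.length j).all (fun c => pvLegal.contains c) = true) ↔
      ∀ r, j + r * l.length < s.length →
        pvLegal.contains (pvXorChar s l (j + r * l.length)) = true := by
  rw [List.all_eq_true]
  constructor
  · intro h r hr
    apply h
    rw [List.mem_iff_getElem?]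
    exact ⟨r, by rw [colFor_get s l j r hj, if_pos hr]⟩
  · intro h x hx
    rw [List.mem_iff_getElem?] at hx
    obtain ⟨r, hr⟩ := hx
    rw [colFor_get s l j r hj] at hr
    by_cases hlt : j + r * l.length < s.length
    · rw [if_pos hlt] at hr
      obtain rfl := Option.some.inj hr
      exact h r hlt
    · rw [if_neg hlt] at hr; simp at hr

theorem allcols_iff (s l : List Char) (hl : 0 < l.length) :
    (∀ j, j < l.length → (colFor s l l.length j).all (fun c => pvLegal.contains c) = true) ↔
      (((List.range s.length).map (pvXorChar s l)).all (fun c => pvLegal.contains c) = true) := by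
  have hD : (((List.range s.length).map (pvXorChar s l)).all (fun c => pvLegal.contains c) = true)
      ↔ ∀ i, i < s.length → pvLegal.contains (pvXorChar s l i) = true := by
    simp [List.all_eq_true]
  rw [hD]
  constructor
  · intro h i hi
    have := (col_all_iff s l (i % l.length) (Nat.mod_lt _ hl)).mp
      (h _ (Nat.mod_lt _ hl)) (i / l.length)
    rw [Nat.mod_add_div' i l.length] at this
    exact this hi
  · intro h j hj
    rw [col_all_iff s l j hj]
    intro r hr
    exact h _ hr

-- helper: filterMap of a prefix-guarded some over a range is a map over a clipped range
theorem filterMap_range_if {α : Type} (t : Nat) (g : Nat → α) : ∀ (k : Nat),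
    (List.range k).filterMap (fun j => if j < t then some (g j) else none) =
      (List.range (min k t)).map g := by
  intro k
  induction k with
  | zero => simp
  | succ k ih =>
    rw [List.range_succ, List.filterMap_append, ih]
    by_cases h : k < t
    · rw [Nat.min_eq_left (by omega), Nat.min_eq_left (by omega), List.range_succ]
      simp [h]
    · rw [Nat.min_eq_right (by omega), Nat.min_eq_right (by omega)]
      simp [h]

-- (8a) one interleave row is a clipped chunk of the decoded sequence
theorem row_eq (s l : List Char) (_hl : 0 < l.length) (i : Nat) :
    ((List.range l.length).map (colFor s l l.length)).filterMap (fun col => col[i]?) =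
      (List.range (min l.length (s.length - i * l.length))).map
        (fun j => pvXorChar s l (j + i * l.length)) := by
  rw [List.filterMap_map]
  have h1 : List.filterMap ((fun col => col[i]?) ∘ colFor s l l.length) (List.range l.length)
      = List.filterMap (fun j => if j < s.length - i * l.length
          then some (pvXorChar s l (j + i * l.length)) else none) (List.range l.length) := by
    apply List.filterMap_congr
    intro j hj
    rw [List.mem_range] at hj
    show (colFor s l l.length j)[i]? = _
    rw [colFor_get s l j i hj]
    by_cases h : j + i * l.length < s.length
    · rw [if_pos h, if_pos (by omega)]
    · rw [if_neg h, if_neg (by omega)]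
  rw [h1, filterMap_range_if]

-- (9) interleaving all rows rebuilds the decoded sequence
theorem flatMap_rows (s l : List Char) (hl : 0 < l.length) :
    ∀ (p : Nat), p ≤ (colFor s l l.length 0).length →
      (List.range p).flatMap (fun i =>
          ((List.range l.length).map (colFor s l l.length)).filterMap (fun col => col[i]?)) =
        (List.range (min (p * l.length) s.length)).map (pvXorChar s l) := by
  intro p
  induction p with
  | zero => simp
  | succ p ih =>
    intro hp
    have hpl : p * l.length < s.length := (col0_len s l hl p).mp (by omega)
    rw [List.range_succ, List.flatMap_append, ih (by omega)]
    simp only [List.flatMap_cons, List.flatMap_nil, List.append_nil]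
    rw [row_eq s l hl p]
    have h2 : (List.range (min l.length (s.length - p * l.length))).map
          (fun j => pvXorChar s l (j + p * l.length)) =
        ((List.range' (p * l.length) (min l.length (s.length - p * l.length))).map
          (pvXorChar s l)) := by
      rw [List.range'_eq_map_range, List.map_map]
      congr 1
      funext j
      simp [Nat.add_comm]
    rw [h2, Nat.min_eq_left (by omega : p * l.length ≤ s.length)]
    simp only [List.range_eq_range']
    rw [← List.map_append]
    have h3 : List.range' 0 (p * l.length) ++
        List.range' (p * l.length) (min l.length (s.length - p * l.length)) =
        List.range' 0 (p * l.length + min l.length (s.length - p * l.length)) := by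
      have := List.range'_append (s := 0) (m := p * l.length)
        (n := min l.length (s.length - p * l.length)) (step := 1)
      simpa using this
    rw [h3]
    congr 2
    rw [Nat.succ_mul]
    omega

-- (7a) bLoop when every remaining column is legal
theorem bLoop_all (s l : List Char) (n : Nat) : ∀ (k j : Nat) (cols : List (List Char)),
    k = n - j →
    (∀ j', j ≤ j' → j' < n → (colFor s l n j').all (fun c => pvLegal.contains c) = true) →
    bLoop s l n j cols =
      String.ofList (interleave (cols ++ (List.range' j (n - j)).map (colFor s l n))) := by
  intro k
  induction k with
  | zero =>
    intro j cols hk _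
    rw [bLoop, if_neg (by omega)]
    have : n - j = 0 := by omega
    simp [this]
  | succ k ih =>
    intro j cols hk hall
    have hj : j < n := by omega
    rw [bLoop, if_pos hj]
    simp only [hall j le_rfl hj, if_pos]
    rw [ih (j + 1) (cols ++ [colFor s l n j]) (by omega)
      (fun j' h1 h2 => hall j' (by omega) h2)]
    congr 1
    rw [List.append_assoc]
    congr 1
    have : n - j = (n - (j + 1)) + 1 := by omega
    rw [this, List.range'_succ]
    simp

-- (7b) bLoop when some remaining column is illegal
theorem bLoop_bad (s l : List Char) (n : Nat) : ∀ (k j : Nat) (cols : List (List Char))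
    (j' : Nat), k = n - j → j ≤ j' → j' < n →
    (colFor s l n j').all (fun c => pvLegal.contains c) = false →
    bLoop s l n j cols = "" := by
  intro k
  induction k with
  | zero => intro j cols j' hk h1 h2 _; omega
  | succ k ih =>
    intro j cols j' hk h1 h2 hbad
    have hj : j < n := by omega
    rw [bLoop, if_pos hj]
    by_cases hje : j' = j
    · subst hje
      simp only [hbad, Bool.false_eq_true, if_false]
    · by_cases hcur : (colFor s l n j).all (fun c => pvLegal.contains c) = true
      · simp only [hcur, if_pos]
        exact ih (j + 1) (cols ++ [colFor s l n j]) j' (by omega) (by omega) h2 hbad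
      · simp only [Bool.not_eq_true] at hcur
        simp only [hcur, Bool.false_eq_true, if_false]

-- ===== VERDICT (by name: the statement is the Claim_ definition above) =====
-- decoded characters are below 128 on Dom, so A's test and B's set agree on them
theorem dec_lt (s l : String) (hdom : Dom_isDecipherable s l) {c : Char}
    (hc : c ∈ (List.range s.toList.length).map (pvXorChar s.toList l.toList)) :
    c.toNat < 128 := by
  have hdom' := hdom
  unfold Dom_isDecipherable at hdom'
  simp only [Bool.and_eq_true] at hdom'
  obtain ⟨i, -, rfl⟩ := List.mem_map.mp hc
  exact xor_char_lt (fun c hc => dom_char_lt hdom'.1 hc)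
    (fun c hc => dom_char_lt hdom'.2 hc) i

theorem isDecipherable_spec : Claim_equal_isDecipherable := by
  intro s l hdom hpre
  unfold Spec_isDecipherable
  by_cases hn : l.toList.length = 0
  · -- empty key: Pre_ forces s = "" (and l = "")
    have hl0 : l = "" := by
      have : l.toList = [] := List.length_eq_zero_iff.mp hn
      have := congrArg String.ofList this
      simpa using this
    have hs0 : s = "" := by
      rcases hpre with h | h
      · exact absurd hl0 h
      · exact h
    subst hl0; subst hs0
    rw [isDecipherable, isDecipherable_alt, encLoop, bLoop]
    simp [checkLoop, interleave]
  · have hl : 0 < l.toList.length := by omega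
    rw [isDecipherable_eq, isDecipherable_alt]
    by_cases hall : ∀ j, j < l.toList.length →
        (colFor s.toList l.toList l.toList.length j).all (fun c => pvLegal.contains c) = true
    · -- every column legal: A keeps the whole decoded string, B interleaves it back
      have hDP := (allcols_iff s.toList l.toList hl).mp hall
      have hDA : ((List.range s.toList.length).map
          (pvXorChar s.toList l.toList)).all isAlphabetA = true := by
        rw [List.all_eq_true]
        intro c hc
        rw [alpha_eq c (dec_lt s l hdom hc)]
        exact List.all_eq_true.mp hDP c hc
      rw [if_pos hDA]
      rw [bLoop_all s.toList l.toList l.toList.length l.toList.length 0 [] (by omega)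
        (fun j' _ h2 => hall j' h2)]
      congr 1
      rw [List.nil_append, Nat.sub_zero, ← List.range_eq_range']
      -- interleave of all columns is the decoded sequence
      obtain ⟨k, hk⟩ : ∃ k, l.toList.length = k + 1 := ⟨l.toList.length - 1, by omega⟩
      unfold interleave
      have hhead : (List.range l.toList.length).map (colFor s.toList l.toList l.toList.length) =
          colFor s.toList l.toList l.toList.length 0 ::
            ((List.range k).map (fun j => colFor s.toList l.toList l.toList.length (j + 1))) := by
        rw [hk, List.range_succ_eq_map, List.map_cons, List.map_map]
        rfl
      rw [hhead]
      simp only []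
      rw [← hhead]
      have := flatMap_rows s.toList l.toList hl
        (colFor s.toList l.toList l.toList.length 0).length le_rfl
      rw [this]
      have hml : ¬ (colFor s.toList l.toList l.toList.length 0).length * l.toList.length
          < s.toList.length := by
        intro hcon
        exact absurd ((col0_len s.toList l.toList hl _).mpr hcon) (by omega)
      rw [Nat.min_eq_right (by omega)]
    · -- some column illegal: both sides return ""
      push Not at hall
      obtain ⟨j', hj', hbad⟩ := hall
      have hbad' : (colFor s.toList l.toList l.toList.length j').all
          (fun c => pvLegal.contains c) = false := by
        simpa using hbad
      rw [bLoop_bad s.toList l.toList l.toList.length l.toList.length 0 [] j' (by omega)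
        (Nat.zero_le _) hj' hbad']
      have hDP : ¬ ((List.range s.toList.length).map
          (pvXorChar s.toList l.toList)).all (fun c => pvLegal.contains c) = true := by
        intro hcon
        exact absurd ((allcols_iff s.toList l.toList hl).mpr hcon j' hj') (by rw [hbad']; simp)
      rw [if_neg (fun hcon => hDP (by
        rw [List.all_eq_true] at hcon ⊢
        intro c hc
        rw [← alpha_eq c (dec_lt s l hdom hc)]
        exact hcon c hc))]
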